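-- pv_equiv track=rewrite | github.com/LibCity/Bigscity-LibCity-Datasets | BJ_roadmap.py | get_highway_to_num
-- ===== SOURCE A (Python) =====
-- def get_highway_to_num(json_obj, feature='highway'):
--     res = dict()
--     i = 0
--     for line in json_obj:
--         if str(line['properties'][feature]) not in res.keys():
--             res[str(line['properties'][feature])] = i
--             i += 1
--     return res
-- ===== SOURCE B (Python) =====
-- def get_highway_to_num(json_obj, feature='highway'):
--     vals = [str(line['properties'][feature]) for line in json_obj]
--     return {v: len(set(vals[:vals.index(v)])) for v in vals}
-- ===== Notes on version B (the rewrite author's own statement) =====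
-- stated objective: alternative
-- what changed: B keeps no running counter and never deduplicates into an ordered key sequence: it computes each key's index independently as the number of distinct stringified values strictly before that key's first occurrence (len(set(vals[:vals.index(v)])) inside a dict comprehension over all values), duplicates merely overwriting with the same value.
import Mathlib
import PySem

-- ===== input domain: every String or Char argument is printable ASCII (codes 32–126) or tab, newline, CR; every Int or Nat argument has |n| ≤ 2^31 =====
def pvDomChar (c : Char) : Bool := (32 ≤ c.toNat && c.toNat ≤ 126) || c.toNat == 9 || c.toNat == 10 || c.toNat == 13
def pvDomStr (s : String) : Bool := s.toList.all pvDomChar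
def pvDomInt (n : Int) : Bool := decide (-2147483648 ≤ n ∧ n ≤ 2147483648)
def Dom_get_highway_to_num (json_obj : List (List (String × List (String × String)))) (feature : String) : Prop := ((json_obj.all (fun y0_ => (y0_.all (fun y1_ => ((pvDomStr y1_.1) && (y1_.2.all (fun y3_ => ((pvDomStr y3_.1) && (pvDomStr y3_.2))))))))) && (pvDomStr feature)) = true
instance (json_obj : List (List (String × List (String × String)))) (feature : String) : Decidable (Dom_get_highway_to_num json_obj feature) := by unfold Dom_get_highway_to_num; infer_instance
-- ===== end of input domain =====

-- B drops A's running counter and ordered dedup pass: each key's index is computed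
-- independently as the number of distinct values before its first occurrence (alternative algorithm, same output).

-- shared helper: str(line['properties'][feature]); the default "" is only reached outside Pre_
def pvVal (line : List (String × List (String × String))) (feature : String) : String :=
  (((PySem.Dict.mk line).get? "properties").bind
    (fun p => (PySem.Dict.mk p).get? feature)).getD ""

-- ===== PORT A =====
def get_highway_to_num (json_obj : List (List (String × List (String × String)))) (feature : String) : List (String × Int) :=
  (json_obj.foldl
      (fun (st : PySem.Dict String Int × Int) line =>
        if st.1.contains (pvVal line feature) then st
        else (st.1.insert (pvVal line feature) st.2, st.2 + 1))
      (PySem.Dict.empty, 0)).1.items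

-- ===== PORT B =====
-- vals = [str(line['properties'][feature]) for line in json_obj]
-- {v: len(set(vals[:vals.index(v)])) for v in vals}   (vals.index always succeeds: v ∈ vals)
def get_highway_to_num_alt (json_obj : List (List (String × List (String × String)))) (feature : String) : List (String × Int) :=
  let vals := json_obj.map (fun line => pvVal line feature)
  (vals.foldl
      (fun (d : PySem.Dict String Int) v =>
        d.insert v (PySem.Set.len (PySem.Set.ofList
          (PySem.List.slice vals none (some (((PySem.List.index? vals v).getD 0 : Nat) : Int))))))
      PySem.Dict.empty).items

-- ===== PRECONDITION & SPEC =====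
-- Pre_ excludes exactly the inputs on which Python A raises KeyError: some line lacking
-- 'properties' or whose properties dict lacks the feature key.
def Pre_get_highway_to_num (json_obj : List (List (String × List (String × String)))) (feature : String) : Prop :=
  ∀ line ∈ json_obj,
    ((((PySem.Dict.mk line).get? "properties").bind
        (fun p => (PySem.Dict.mk p).get? feature)).isSome = true)
instance (json_obj : List (List (String × List (String × String)))) (feature : String) : Decidable (Pre_get_highway_to_num json_obj feature) := by unfold Pre_get_highway_to_num; infer_instance

def pvWitness_get_highway_to_num : (List (List (String × List (String × String)))) × String :=
  ([[("properties", [("highway", "primary")])],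
    [("properties", [("highway", "secondary")])],
    [("properties", [("highway", "primary")])]], "highway")

def Spec_get_highway_to_num (json_obj : List (List (String × List (String × String)))) (feature : String) (out : List (String × Int)) : Prop := out = get_highway_to_num_alt json_obj feature
instance (json_obj : List (List (String × List (String × String)))) (feature : String) (out : List (String × Int)) : Decidable (Spec_get_highway_to_num json_obj feature out) := by unfold Spec_get_highway_to_num; infer_instance

-- ===== CLAIM (what is proved, stated in full; the proofs are below) =====
def Claim_equal_get_highway_to_num : Prop := ∀ (json_obj : List (List (String × List (String × String)))) (feature : String), Dom_get_highway_to_num json_obj feature → Pre_get_highway_to_num json_obj feature → Spec_get_highway_to_num json_obj feature (get_highway_to_num json_obj feature)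

-- ===== LEMMAS AND PROOFS =====

-- the keys of `vals` that are new relative to `seen`, first occurrences, in order
def pvNew (seen : List String) : List String → List String
  | [] => []
  | v :: t => if v ∈ seen then pvNew seen t else v :: pvNew (v :: seen) t

theorem pvNew_congr (l : List String) : ∀ {s₁ s₂ : List String},
    (∀ x, x ∈ s₁ ↔ x ∈ s₂) → pvNew s₁ l = pvNew s₂ l := by
  induction l with
  | nil => intro _ _ _; simp [pvNew]
  | cons v t ih =>
    intro s₁ s₂ h
    simp only [pvNew]
    by_cases hv : v ∈ s₁
    · rw [if_pos hv, if_pos ((h v).1 hv)]; exact ih h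
    · rw [if_neg hv, if_neg (fun hv' => hv ((h v).2 hv'))]
      refine congrArg (v :: ·) (ih ?_)
      intro x; simp [h x]

theorem foldl_setAdd_eq_append_pvNew : ∀ (vals acc : List String),
    vals.foldl PySem.Set.add acc = acc ++ pvNew acc vals := by
  intro vals
  induction vals with
  | nil => intro acc; simp [pvNew]
  | cons v t ih =>
    intro acc
    by_cases hv : v ∈ acc
    · simp only [List.foldl_cons, pvNew, if_pos hv, PySem.Set.add]
      simp only [show PySem.Set.contains acc v = true by simp [PySem.Set.contains, hv], if_true]
      exact ih acc
    · simp only [List.foldl_cons, pvNew, if_neg hv, PySem.Set.add]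
      simp only [show PySem.Set.contains acc v = false by simp [PySem.Set.contains, hv],
        Bool.false_eq_true, if_false]
      rw [ih (acc ++ [v]),
        pvNew_congr t (s₁ := acc ++ [v]) (s₂ := v :: acc) (by intro x; simp; tauto)]
      simp

-- A's fold, expressed over the list of stringified feature values
def pvFoldA (vals : List String) (st : PySem.Dict String Int × Int) : PySem.Dict String Int × Int :=
  vals.foldl
    (fun st v => if st.1.contains v then st else (st.1.insert v st.2, st.2 + 1)) st

theorem pvFoldA_items : ∀ (vals : List String) (d : PySem.Dict String Int) (i : Int),
    d.keys.Nodup →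
    (pvFoldA vals (d, i)).1.items
      = d.items ++ (PySem.List.enumerate (pvNew d.keys vals) i).map (fun p => (p.2, p.1)) := by
  intro vals
  induction vals with
  | nil => intro d i _; simp [pvFoldA, pvNew]
  | cons v t ih =>
    simp only [pvFoldA] at ih ⊢
    intro d i hnd
    by_cases hv : v ∈ d.keys
    · have hc : d.contains v = true := (PySem.Dict.contains_iff_mem_keys d v).2 hv
      simp only [List.foldl_cons, hc, if_true, pvNew, if_pos hv]
      exact ih d i hnd
    · have hc : d.contains v = false := by
        by_contra h
        exact hv ((PySem.Dict.contains_iff_mem_keys d v).1 (by simpa using h))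
      simp only [List.foldl_cons, hc, Bool.false_eq_true, if_false, pvNew, if_neg hv]
      have hnd' : (d.insert v i).keys.Nodup := PySem.Dict.nodup_keys_insert d v i hnd
      rw [ih (d.insert v i) (i + 1) hnd']
      rw [PySem.Dict.items_insert_of_not_contains d i hc,
        PySem.Dict.keys_insert_of_not_contains d i hc]
      rw [pvNew_congr t (s₁ := d.keys ++ [v]) (s₂ := v :: d.keys) (by intro x; simp; tauto)]
      simp [PySem.List.enumerate]

-- replacing an entry already holding the same value is the identity on the items list
theorem pvMapIf_id : ∀ (L : List (String × Int)) (v : String) (w : Int),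
    (∀ p ∈ L, p.1 = v → p.2 = w) →
    L.map (fun p => if (p.1 == v) = true then (v, w) else p) = L := by
  intro L v w h
  induction L with
  | nil => rfl
  | cons p t ih =>
    simp only [List.map_cons]
    have hhead : (if (p.1 == v) = true then (v, w) else p) = p := by
      by_cases hp : p.1 = v
      · rw [if_pos (by simpa using hp)]
        have h2 := h p (by simp) hp
        cases p; simp_all
      · rw [if_neg (by simpa using hp)]
    rw [hhead, ih (fun q hq => h q (by simp [hq]))]

-- B's dict-comprehension fold, for any value function depending only on the key
theorem pvFoldB_items (F : String → Int) : ∀ (ks : List String) (d : PySem.Dict String Int),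
    d.keys.Nodup → (∀ v ∈ ks, ∀ w, (v, w) ∈ d.items → w = F v) →
    (ks.foldl (fun d v => d.insert v (F v)) d).items
      = d.items ++ (pvNew d.keys ks).map (fun v => (v, F v)) := by
  intro ks
  induction ks with
  | nil => intro d _ _; simp [pvNew]
  | cons v t ih =>
    intro d hnd hval
    simp only [List.foldl_cons, pvNew]
    by_cases hv : v ∈ d.keys
    · have hc : d.contains v = true := (PySem.Dict.contains_iff_mem_keys d v).2 hv
      have hid : d.insert v (F v) = d := by
        apply PySem.Dict.ext
        rw [PySem.Dict.items_insert_of_contains d (F v) hc]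
        exact pvMapIf_id d.items v (F v)
          (fun p hp hp1 => hval v (by simp) p.2 (by rw [← hp1]; simpa using hp))
      rw [hid, if_pos hv]
      exact ih d hnd (fun u hu => hval u (by simp [hu]))
    · have hc : d.contains v = false := by
        by_contra h
        exact hv ((PySem.Dict.contains_iff_mem_keys d v).1 (by simpa using h))
      rw [if_neg hv]
      have hnd' : (d.insert v (F v)).keys.Nodup := PySem.Dict.nodup_keys_insert d v (F v) hnd
      rw [ih (d.insert v (F v)) hnd' ?_]
      · rw [PySem.Dict.items_insert_of_not_contains d (F v) hc,
          PySem.Dict.keys_insert_of_not_contains d (F v) hc]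
        rw [pvNew_congr t (s₁ := d.keys ++ [v]) (s₂ := v :: d.keys) (by intro x; simp; tauto)]
        simp
      · intro u hu w hw
        rw [PySem.Dict.items_insert_of_not_contains d (F v) hc] at hw
        rcases List.mem_append.1 hw with hw | hw
        · exact hval u (by simp [hu]) w hw
        · have hw' : u = v ∧ w = F v := by
            rw [List.mem_singleton, Prod.ext_iff] at hw
            exact hw
          rw [hw'.2, hw'.1]
  
-- enumerate-swap over a Nodup list is indexing by first position
theorem pvEnumSwap : ∀ (l : List String), l.Nodup → ∀ (s : Int),
    (PySem.List.enumerate l s).map (fun p => (p.2, p.1))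
      = l.map (fun v => (v, s + (((PySem.List.index? l v).getD 0 : Nat) : Int))) := by
  intro l
  induction l with
  | nil => intro _ _; simp [PySem.List.enumerate]
  | cons x t ih =>
    intro hnd s
    rw [PySem.List.enumerate_cons]
    simp only [List.map_cons]
    have hx : PySem.List.index? (x :: t) x = some 0 := PySem.List.index?_cons_self x t
    rw [hx]
    have h1 : (PySem.List.enumerate t (s + 1)).map (fun p => (p.2, p.1))
        = t.map (fun v => (v, (s + 1) + (((PySem.List.index? t v).getD 0 : Nat) : Int))) :=
      ih (List.Nodup.of_cons hnd) (s + 1)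
    rw [h1]
    have h2 : ∀ v ∈ t,
        (v, (s + 1) + (((PySem.List.index? t v).getD 0 : Nat) : Int))
          = (v, s + (((PySem.List.index? (x :: t) v).getD 0 : Nat) : Int)) := by
      intro v hv
      have hne : x ≠ v := by
        rintro rfl; exact (List.nodup_cons.1 hnd).1 hv
      rw [PySem.List.index?_cons_of_ne t hne]
      obtain ⟨k, hk⟩ := Option.isSome_iff_exists.1 ((PySem.List.index?_isSome_iff t v).2 hv)
      rw [hk]
      simp only [Option.map_some, Option.getD_some]
      push_cast
      ring_nf
    rw [List.map_congr_left h2]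
    norm_num

-- the port's per-key value equals the key's first position in the ordered dedup of vals
theorem pvKeyVal : ∀ (vals : List String) (v : String), v ∈ vals →
    PySem.Set.len (PySem.Set.ofList
        (PySem.List.slice vals none (some (((PySem.List.index? vals v).getD 0 : Nat) : Int))))
      = (((PySem.List.index? (PySem.List.dedup vals) v).getD 0 : Nat) : Int) := by
  intro vals v hv
  obtain ⟨k, hk⟩ := Option.isSome_iff_exists.1 ((PySem.List.index?_isSome_iff vals v).2 hv)
  obtain ⟨pre, suf, hsplit, hlen, hnotmem⟩ := (PySem.List.index?_eq_some_iff vals v k).1 hk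
  rw [hk]
  simp only [Option.getD_some]
  rw [PySem.List.slice_to_natCast]
  have htake : vals.take k = pre := by
    rw [hsplit, ← hlen, List.take_left]
  rw [htake]
  have hvS : v ∉ PySem.Set.ofList pre := fun h => hnotmem ((PySem.Set.mem_ofList pre v).1 h)
  have hded : PySem.List.dedup vals
      = (PySem.Set.ofList pre ++ [v]) ++ pvNew (PySem.Set.ofList pre ++ [v]) suf := by
    rw [PySem.List.dedup_eq_ofList, PySem.Set.ofList_eq_foldl, hsplit,
      List.foldl_append, List.foldl_cons]
    have hadd : PySem.Set.add (List.foldl PySem.Set.add [] pre) v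
        = PySem.Set.ofList pre ++ [v] := by
      rw [← PySem.Set.ofList_eq_foldl]
      simp only [PySem.Set.add]
      rw [show PySem.Set.contains (PySem.Set.ofList pre) v = false by
        simp [PySem.Set.contains]; exact hnotmem]
      simp
    rw [hadd, foldl_setAdd_eq_append_pvNew]
  rw [hded,
    PySem.List.index?_append_of_mem (pvNew (PySem.Set.ofList pre ++ [v]) suf)
      (by simp : v ∈ PySem.Set.ofList pre ++ [v]),
    PySem.List.index?_append_singleton_self _ v hvS]
  simp [PySem.Set.len]

-- ===== VERDICT (by name: the statement is the Claim_ definition above) =====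
theorem get_highway_to_num_spec : Claim_equal_get_highway_to_num := by
  intro json_obj feature _ _
  unfold Spec_get_highway_to_num get_highway_to_num get_highway_to_num_alt
  dsimp only
  set vals := json_obj.map (fun line => pvVal line feature) with hvals
  have h1 : (json_obj.foldl
      (fun (st : PySem.Dict String Int × Int) line =>
        if st.1.contains (pvVal line feature) then st
        else (st.1.insert (pvVal line feature) st.2, st.2 + 1))
      (PySem.Dict.empty, 0))
      = pvFoldA vals (PySem.Dict.empty, 0) := by
    rw [hvals]; simp [pvFoldA, List.foldl_map]
  rw [h1]
  rw [pvFoldA_items vals (PySem.Dict.empty : PySem.Dict String Int) 0 (by simp [PySem.Dict.empty])]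
  rw [pvFoldB_items
    (fun v => PySem.Set.len (PySem.Set.ofList
      (PySem.List.slice vals none (some (((PySem.List.index? vals v).getD 0 : Nat) : Int)))))
    vals (PySem.Dict.empty : PySem.Dict String Int)
    (by simp [PySem.Dict.empty]) (by intro u _ w hw; simp [PySem.Dict.empty] at hw)]
  have hkeys : (PySem.Dict.empty : PySem.Dict String Int).keys = ([] : List String) := rfl
  rw [hkeys]
  have hpv : pvNew [] vals = PySem.List.dedup vals := by
    rw [PySem.List.dedup_eq_ofList, PySem.Set.ofList_eq_foldl]
    have := foldl_setAdd_eq_append_pvNew vals []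
    simpa using this.symm
  rw [hpv]
  rw [pvEnumSwap (PySem.List.dedup vals) (by
    rw [PySem.List.dedup_eq_ofList]; exact PySem.Set.nodup_ofList vals) 0]
  have hitems : (PySem.Dict.empty : PySem.Dict String Int).items = [] := rfl
  rw [hitems]
  simp only [List.nil_append]
  apply List.map_congr_left
  intro v hv
  have hv' : v ∈ vals := by
    rw [PySem.List.dedup_eq_ofList] at hv
    exact (PySem.Set.mem_ofList vals v).1 hv
  rw [pvKeyVal vals v hv']
  norm_num
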